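-- pv_equiv track=rewrite | github.com/clee421/advent-of-code | 2023/day13/run.py | is_v_mirror
-- ===== SOURCE A (Python) =====
-- from typing import Dict, List, Tuple, Set
--
-- def is_v_mirror(pat: List[str], split: int) -> bool:
--     h, w = len(pat), len(pat[0])
--     offset = 0
--     while split - offset >= 0 and split + 1 + offset < w:
--         for r in range(h):
--             if pat[r][split - offset] != pat[r][split + 1 + offset]:
--                 return False
--         offset += 1
--     return offset > 0
-- ===== SOURCE B (Python) =====
-- def is_v_mirror(pat, split):
--     w = len(pat[0])
--     k = min(split + 1, w - split - 1)
--     if k <= 0: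
--         return False
--     return all(row[split + 1: split + 1 + k] == row[split - k + 1: split + 1][::-1]
--                for row in pat)
-- ===== Notes on version B (the rewrite author's own statement) =====
-- stated objective: simpler
-- what changed: Replaces A's outward-expanding while loop over offsets (re-scanning all rows at each offset) by a closed-form overlap depth k = min(split+1, w-split-1) and a single reversed-slice comparison per row.
-- outside the precondition, e.g. on is_v_mirror(['ab', 'c'], 0): A returns False, B returns False
import Mathlib
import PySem

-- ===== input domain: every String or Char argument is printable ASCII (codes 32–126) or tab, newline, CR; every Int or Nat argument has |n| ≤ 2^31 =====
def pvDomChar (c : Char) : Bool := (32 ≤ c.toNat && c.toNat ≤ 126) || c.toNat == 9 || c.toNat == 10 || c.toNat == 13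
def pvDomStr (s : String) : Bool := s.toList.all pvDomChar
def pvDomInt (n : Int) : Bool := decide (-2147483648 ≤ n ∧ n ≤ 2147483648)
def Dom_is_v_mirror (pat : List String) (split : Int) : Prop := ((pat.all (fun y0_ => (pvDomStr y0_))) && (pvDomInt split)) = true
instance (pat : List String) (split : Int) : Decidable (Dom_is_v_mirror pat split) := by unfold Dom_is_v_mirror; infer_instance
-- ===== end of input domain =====

-- B replaces A's outward-expanding offset loop by a closed-form overlap depth k and one
-- reversed-slice comparison per row (objective: simpler decomposition, same cost).


-- ===== PORT A =====
-- inner 'for r in range(h): if pat[r][i] != pat[r][j]: return False' — a scan over the rows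
def pvPairOk (pat : List String) (i j : Int) : Bool :=
  pat.all (fun s => PySem.Str.pyGet? s i == PySem.Str.pyGet? s j)

-- the while loop of A; offset grows until a side runs off the pattern
def pvALoop (pat : List String) (split w offset : Int) : Bool :=
  if h : 0 ≤ split - offset ∧ split + 1 + offset < w then
    if pvPairOk pat (split - offset) (split + 1 + offset) then
      pvALoop pat split w (offset + 1)
    else false
  else decide (offset > 0)
termination_by (w - 2*offset).toNat
decreasing_by omega

def is_v_mirror (pat : List String) (split : Int) : Bool :=
  -- w = len(pat[0]); Python raises IndexError on pat = [], excluded by Pre_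
  pvALoop pat split (PySem.Str.len (pat.headD "")) 0

-- ===== PORT B =====
def is_v_mirror_alt (pat : List String) (split : Int) : Bool :=
  let w := PySem.Str.len (pat.headD "")   -- len(pat[0]); [] excluded by Pre_
  let k := min (split + 1) (w - split - 1)
  if k ≤ 0 then false
  else pat.all (fun row =>
    PySem.Str.slice row (some (split + 1)) (some (split + 1 + k)) ==
    -- row[split-k+1 : split+1][::-1]; step -1 never raises, so getD "" is never taken
    (PySem.Str.slice? (PySem.Str.slice row (some (split - k + 1)) (some (split + 1))) none none (-1)).getD "")

-- ===== PRECONDITION & SPEC =====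
-- Pre_ excludes empty pat (A raises IndexError on pat[0]) and, for splits in range, patterns
-- with a row too short to cover the k = min(split+1, w-split-1) mirrored column pairs: there
-- A can index past that row and raise IndexError (when it happens to return False early
-- instead, B's value is documented in the claim's cite).
def Pre_is_v_mirror (pat : List String) (split : Int) : Prop :=
  pat ≠ [] ∧ ((0 ≤ split ∧ split + 1 < PySem.Str.len (pat.headD "")) →
    ∀ s ∈ pat, split + 1 + min (split + 1) (PySem.Str.len (pat.headD "") - split - 1) ≤ PySem.Str.len s)
instance (pat : List String) (split : Int) : Decidable (Pre_is_v_mirror pat split) := by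
  unfold Pre_is_v_mirror; infer_instance

def pvWitness_is_v_mirror : List String × Int := (["#.#", "#.#"], 1)

def Spec_is_v_mirror (pat : List String) (split : Int) (out : Bool) : Prop := out = is_v_mirror_alt pat split
instance (pat : List String) (split : Int) (out : Bool) : Decidable (Spec_is_v_mirror pat split out) := by unfold Spec_is_v_mirror; infer_instance

-- ===== CLAIM (what is proved, stated in full; the proofs are below) =====
def Claim_equal_is_v_mirror : Prop := ∀ (pat : List String) (split : Int), Dom_is_v_mirror pat split → Pre_is_v_mirror pat split → Spec_is_v_mirror pat split (is_v_mirror pat split)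

-- ===== LEMMAS AND PROOFS =====

-- A's loop, started at offset with k - offset pairs still to check, tests exactly those pairs.
lemma pvALoop_run (pat : List String) (split w : Int)
    (hk : 1 ≤ min (split + 1) (w - split - 1)) :
    ∀ (n : Nat) (offset : Int), 0 ≤ offset →
      offset + n = min (split + 1) (w - split - 1) →
      pvALoop pat split w offset =
        (List.range n).all (fun j => pvPairOk pat (split - (offset + j)) (split + 1 + (offset + j))) := by
  intro n
  induction n with
  | zero =>
    intro offset h0 hsum
    rw [pvALoop, dif_neg (by omega)]
    simp
    omega
  | succ n ih =>
    intro offset h0 hsum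
    have hn : ((n : Int) + 1) = ((n + 1 : Nat) : Int) := by push_cast; ring
    rw [pvALoop, dif_pos (by omega)]
    rw [List.range_succ_eq_map]
    simp only [List.all_cons, List.all_map]
    have h0' : (split - (offset + ((0 : Nat) : Int))) = split - offset := by push_cast; ring
    have h0'' : (split + 1 + (offset + ((0 : Nat) : Int))) = split + 1 + offset := by push_cast; ring
    cases hp : pvPairOk pat (split - offset) (split + 1 + offset) with
    | false => simp [hp]
    | true =>
      simp only [hp, if_true, h0', h0'', Bool.true_and]
      rw [ih (offset + 1) (by omega) (by push_cast at hsum ⊢; omega)]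
      refine List.all_congr rfl (fun j => ?_)
      have e1 : split - (offset + 1 + (j : Int)) = split - (offset + ((Nat.succ j : Nat) : Int)) := by push_cast; ring
      have e2 : split + 1 + (offset + 1 + (j : Int)) = split + 1 + (offset + ((Nat.succ j : Nat) : Int)) := by push_cast; ring
      simp [Function.comp, e1, e2]

-- per-row bridge: on a row of the full width, B's reversed-slice comparison equals
-- the conjunction of A's k character-pair tests
lemma row_bridge (row : String) (split w : Int)
    (hw : split + 1 + min (split + 1) (w - split - 1) ≤ PySem.Str.len row)
    (hs : 0 ≤ split) (hlt : split + 1 < w) :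
    (PySem.Str.slice row (some (split + 1)) (some (split + 1 + min (split + 1) (w - split - 1))) ==
      (PySem.Str.slice? (PySem.Str.slice row (some (split - min (split + 1) (w - split - 1) + 1)) (some (split + 1))) none none (-1)).getD "") =
    (List.range (min (split + 1) (w - split - 1)).toNat).all
      (fun j => PySem.Str.pyGet? row (split - (j : Int)) == PySem.Str.pyGet? row (split + 1 + (j : Int))) := by
  have hw' : split + 1 + min (split + 1) (w - split - 1) ≤ (row.toList.length : Int) := by
    have := PySem.Str.len_eq row; omega
  set cs := row.toList with hcs
  set k := min (split + 1) (w - split - 1) with hkdef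
  have hk1 : 1 ≤ k := by omega
  have hklesp : k ≤ split + 1 := by omega
  rw [Bool.eq_iff_iff]
  simp only [beq_iff_eq, List.all_eq_true, List.mem_range]
  rw [PySem.Str.slice?_none_none_neg_one, Option.getD_some, ← String.toList_inj,
      String.toList_ofList, PySem.Str.toList_slice, PySem.Str.toList_slice,
      PySem.Chars.slice_eq_listSlice, PySem.Chars.slice_eq_listSlice]
  rw [PySem.List.slice_toNat cs (by omega) (by omega),
      PySem.List.slice_toNat cs (by omega) (by omega)]
  have e1 : (split + 1 + k).toNat - (split + 1).toNat = k.toNat := by omega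
  have e2 : (split + 1).toNat - (split - k + 1).toNat = k.toNat := by omega
  rw [e1, e2]
  have hlenR : (List.take k.toNat (List.drop (split + 1).toNat cs)).length = k.toNat := by
    simp [List.length_take, List.length_drop]; omega
  have hlenL : (List.take k.toNat (List.drop (split - k + 1).toNat cs)).length = k.toNat := by
    simp [List.length_take, List.length_drop]; omega
  rw [List.ext_getElem_iff]
  simp only [List.length_reverse, hlenR, hlenL, List.getElem_reverse, List.getElem_take,
    List.getElem_drop, true_and]
  constructor
  · intro h j hj
    have hj2 := h j (by omega) (by omega)
    rw [PySem.Str.pyGet?_eq, PySem.Str.pyGet?_eq, PySem.Chars.pyGet?_eq_listPyGet?,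
        PySem.Chars.pyGet?_eq_listPyGet?, ← hcs,
        PySem.List.pyGet?_of_nonneg_of_lt cs (by omega) (by omega),
        PySem.List.pyGet?_of_nonneg_of_lt cs (by omega) (by omega),
        List.getElem?_eq_getElem (by omega), List.getElem?_eq_getElem (by omega),
        Option.some_inj]
    have e3 : (split - (j:Int)).toNat = (split - k + 1).toNat + (k.toNat - 1 - j) := by omega
    have e4 : (split + 1 + (j:Int)).toNat = (split + 1).toNat + j := by omega
    simp only [e3, e4]
    exact hj2.symm
  · intro h i h1 h2
    have hi := h i (by omega)
    rw [PySem.Str.pyGet?_eq, PySem.Str.pyGet?_eq, PySem.Chars.pyGet?_eq_listPyGet?,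
        PySem.Chars.pyGet?_eq_listPyGet?, ← hcs,
        PySem.List.pyGet?_of_nonneg_of_lt cs (by omega) (by omega),
        PySem.List.pyGet?_of_nonneg_of_lt cs (by omega) (by omega),
        List.getElem?_eq_getElem (by omega), List.getElem?_eq_getElem (by omega),
        Option.some_inj] at hi
    have e3 : (split - (i:Int)).toNat = (split - k + 1).toNat + (k.toNat - 1 - i) := by omega
    have e4 : (split + 1 + (i:Int)).toNat = (split + 1).toNat + i := by omega
    simp only [e3, e4] at hi
    exact hi.symm

-- ===== VERDICT (by name: the statement is the Claim_ definition above) =====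
theorem is_v_mirror_spec : Claim_equal_is_v_mirror := by
  intro pat split _hdom hpre
  obtain ⟨hne, hunif⟩ := hpre
  unfold Spec_is_v_mirror is_v_mirror is_v_mirror_alt
  set w := PySem.Str.len (pat.headD "") with hwdef
  by_cases hir : 0 ≤ split ∧ split + 1 < w
  · -- split in range: both sides test the k overlapping column pairs
    set k := min (split + 1) (w - split - 1) with hkdef
    have hk1 : 1 ≤ k := by omega
    rw [pvALoop_run pat split w (by omega) k.toNat 0 le_rfl (by omega),
        if_neg (by omega)]
    rw [Bool.eq_iff_iff]
    simp only [List.all_eq_true, List.mem_range, pvPairOk]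
    constructor
    · intro h row hrow
      rw [row_bridge row split w (hunif hir row hrow) hir.1 hir.2]
      simp only [List.all_eq_true, List.mem_range]
      intro j hj
      have := h j hj row hrow
      simpa using this
    · intro h j hj row hrow
      have hr := h row hrow
      rw [row_bridge row split w (hunif hir row hrow) hir.1 hir.2] at hr
      simp only [List.all_eq_true, List.mem_range] at hr
      have := hr j hj
      simpa using this
  · -- split out of range: A's loop body never runs (offset stays 0), B's overlap k is ≤ 0
    rw [pvALoop, dif_neg (by omega), if_pos (by omega)]
    decide
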